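-- pv_equiv track=rewrite | github.com/atharvasonawane/ai_audit_new_approach | audit_tool/task2_audit/checkers/flag_engine.py | summarise_flags
-- ===== SOURCE A (Python) =====
-- def summarise_flags(flags: list) -> dict:
--     """
--     Group a flat list of flag strings into their categories.
--
--     Useful for the database layer and for report generation — callers
--     don't need to know which flags belong to which category.
--
--     Args:
--         flags (list[str]): Output of evaluate_flags().
--
--     Returns:
--         dict: Keys are category names, values are lists of flag strings
--               that fell into that category.  An empty list per category
--               means no flags were triggered in that category.
--     """
--     category_map = {
--         "API":       {"HIGH_API_USAGE", "VERY_HIGH_API_USAGE", "EXCESSIVE_API_USAGE",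
--                       "HEAVY_MOUNTED_API"},
--         "PAYLOAD":   {"COMPLEX_PAYLOAD", "VERY_COMPLEX_PAYLOAD", "DEEP_NESTED_PAYLOAD",
--                       "LARGE_PAYLOAD"},
--         "COMPONENT": {"LARGE_COMPONENT", "MANY_METHODS", "MANY_COMPUTED",
--                       "MANY_WATCHERS", "TOO_MANY_PROPS"},
--         "COMBINED":  {"HIGH_RISK_COMPONENT", "CRITICAL_COMPONENT", "HEAVY_COMPONENT",
--                       "MONOLITH_COMPONENT", "COMPLEX_HEAVY_COMPONENT",
--                       "ARCHITECTURE_CONCERN"},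
--         "PATTERN":   {"API_IN_LOOP", "API_CHAINING", "DEPENDENT_API_CALLS",
--                       "DUPLICATE_API_CALLS"},
--         "TEMPLATE":  {"COMPLEX_TEMPLATE", "DEEP_NESTED_TEMPLATE", "MANY_CHILDREN"},
--     }
--     flag_set = set(flags)
--     return {
--         cat: sorted(flag_set & cat_flags)
--         for cat, cat_flags in category_map.items()
--     }
-- ===== SOURCE B (Python) =====
-- # Flat dispatch table: (flag, category) pairs, flags pre-sorted within each
-- # category, so no runtime sort is needed at all.
-- _FLAG_TABLE = [
--     ("EXCESSIVE_API_USAGE", "API"),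
--     ("HEAVY_MOUNTED_API", "API"),
--     ("HIGH_API_USAGE", "API"),
--     ("VERY_HIGH_API_USAGE", "API"),
--     ("COMPLEX_PAYLOAD", "PAYLOAD"),
--     ("DEEP_NESTED_PAYLOAD", "PAYLOAD"),
--     ("LARGE_PAYLOAD", "PAYLOAD"),
--     ("VERY_COMPLEX_PAYLOAD", "PAYLOAD"),
--     ("LARGE_COMPONENT", "COMPONENT"),
--     ("MANY_COMPUTED", "COMPONENT"),
--     ("MANY_METHODS", "COMPONENT"),
--     ("MANY_WATCHERS", "COMPONENT"),
--     ("TOO_MANY_PROPS", "COMPONENT"),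
--     ("ARCHITECTURE_CONCERN", "COMBINED"),
--     ("COMPLEX_HEAVY_COMPONENT", "COMBINED"),
--     ("CRITICAL_COMPONENT", "COMBINED"),
--     ("HEAVY_COMPONENT", "COMBINED"),
--     ("HIGH_RISK_COMPONENT", "COMBINED"),
--     ("MONOLITH_COMPONENT", "COMBINED"),
--     ("API_CHAINING", "PATTERN"),
--     ("API_IN_LOOP", "PATTERN"),
--     ("DEPENDENT_API_CALLS", "PATTERN"),
--     ("DUPLICATE_API_CALLS", "PATTERN"),
--     ("COMPLEX_TEMPLATE", "TEMPLATE"),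
--     ("DEEP_NESTED_TEMPLATE", "TEMPLATE"),
--     ("MANY_CHILDREN", "TEMPLATE"),
-- ]
--
--
-- def summarise_flags(flags: list) -> dict:
--     """Group a flat list of flag strings into their categories.
--
--     Same result as the original, but instead of six set-intersection scans
--     followed by six sorts, walk the fixed (flag, category) table once --
--     its flags are already sorted within each category -- and append each
--     flag that occurs in the input to its category bucket.
--     """
--     seen = set(flags)
--     result = {"API": [], "PAYLOAD": [], "COMPONENT": [], "COMBINED": [],
--               "PATTERN": [], "TEMPLATE": []}
--     for flag, cat in _FLAG_TABLE:
--         if flag in seen: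
--             result[cat].append(flag)
--     return result
-- ===== Notes on version B (the rewrite author's own statement) =====
-- stated objective: alternative
-- what changed: Replaces the six set-intersection-then-sort scans with a single pass over a flat (flag, category) dispatch table whose flags are pre-sorted within each category, appending each input flag to its bucket, so no runtime sort is performed at all.
import Mathlib
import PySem

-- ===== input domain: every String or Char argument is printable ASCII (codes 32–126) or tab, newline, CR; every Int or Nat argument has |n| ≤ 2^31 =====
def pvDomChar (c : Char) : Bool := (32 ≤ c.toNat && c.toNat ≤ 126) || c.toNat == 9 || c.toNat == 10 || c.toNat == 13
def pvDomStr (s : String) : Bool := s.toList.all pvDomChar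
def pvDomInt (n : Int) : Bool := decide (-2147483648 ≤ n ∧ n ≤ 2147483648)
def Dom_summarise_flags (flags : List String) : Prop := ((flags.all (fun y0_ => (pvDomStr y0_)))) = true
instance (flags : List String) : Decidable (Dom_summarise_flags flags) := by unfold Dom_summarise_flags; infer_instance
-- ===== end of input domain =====

-- B replaces A's six set-intersection-then-sort scans by one pass over a flat
-- (flag, category) dispatch table whose flags are pre-sorted within each category,
-- so no runtime sort is needed; same return value everywhere.

-- ===== PORT A =====
-- A's category_map: a dict from category name to a set of flag strings.
def pvCategoryMapA : PySem.Dict String (PySem.Set String) := PySem.Dict.ofList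
  [ ("API",       PySem.Set.ofList ["HIGH_API_USAGE", "VERY_HIGH_API_USAGE", "EXCESSIVE_API_USAGE",
                                    "HEAVY_MOUNTED_API"]),
    ("PAYLOAD",   PySem.Set.ofList ["COMPLEX_PAYLOAD", "VERY_COMPLEX_PAYLOAD", "DEEP_NESTED_PAYLOAD",
                                    "LARGE_PAYLOAD"]),
    ("COMPONENT", PySem.Set.ofList ["LARGE_COMPONENT", "MANY_METHODS", "MANY_COMPUTED",
                                    "MANY_WATCHERS", "TOO_MANY_PROPS"]),
    ("COMBINED",  PySem.Set.ofList ["HIGH_RISK_COMPONENT", "CRITICAL_COMPONENT", "HEAVY_COMPONENT",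
                                    "MONOLITH_COMPONENT", "COMPLEX_HEAVY_COMPONENT",
                                    "ARCHITECTURE_CONCERN"]),
    ("PATTERN",   PySem.Set.ofList ["API_IN_LOOP", "API_CHAINING", "DEPENDENT_API_CALLS",
                                    "DUPLICATE_API_CALLS"]),
    ("TEMPLATE",  PySem.Set.ofList ["COMPLEX_TEMPLATE", "DEEP_NESTED_TEMPLATE", "MANY_CHILDREN"]) ]

def summarise_flags (flags : List String) : List (String × List String) :=
  let flag_set : PySem.Set String := PySem.Set.ofList flags
  pvCategoryMapA.items.map
    (fun p => (p.1, PySem.List.sorted (PySem.Set.inter flag_set p.2) (fun x => x) false))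

-- ===== PORT B =====
-- B's flat dispatch table: (flag, category) pairs, flags pre-sorted within each category.
def pvFlagTable : List (String × String) :=
  [ ("EXCESSIVE_API_USAGE", "API"),
    ("HEAVY_MOUNTED_API", "API"),
    ("HIGH_API_USAGE", "API"),
    ("VERY_HIGH_API_USAGE", "API"),
    ("COMPLEX_PAYLOAD", "PAYLOAD"),
    ("DEEP_NESTED_PAYLOAD", "PAYLOAD"),
    ("LARGE_PAYLOAD", "PAYLOAD"),
    ("VERY_COMPLEX_PAYLOAD", "PAYLOAD"),
    ("LARGE_COMPONENT", "COMPONENT"),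
    ("MANY_COMPUTED", "COMPONENT"),
    ("MANY_METHODS", "COMPONENT"),
    ("MANY_WATCHERS", "COMPONENT"),
    ("TOO_MANY_PROPS", "COMPONENT"),
    ("ARCHITECTURE_CONCERN", "COMBINED"),
    ("COMPLEX_HEAVY_COMPONENT", "COMBINED"),
    ("CRITICAL_COMPONENT", "COMBINED"),
    ("HEAVY_COMPONENT", "COMBINED"),
    ("HIGH_RISK_COMPONENT", "COMBINED"),
    ("MONOLITH_COMPONENT", "COMBINED"),
    ("API_CHAINING", "PATTERN"),
    ("API_IN_LOOP", "PATTERN"),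
    ("DEPENDENT_API_CALLS", "PATTERN"),
    ("DUPLICATE_API_CALLS", "PATTERN"),
    ("COMPLEX_TEMPLATE", "TEMPLATE"),
    ("DEEP_NESTED_TEMPLATE", "TEMPLATE"),
    ("MANY_CHILDREN", "TEMPLATE") ]

def summarise_flags_alt (flags : List String) : List (String × List String) :=
  -- seen = set(flags)
  let seen : PySem.Set String := PySem.Set.ofList flags
  -- result = {"API": [], ..., "TEMPLATE": []}
  let result0 : PySem.Dict String (List String) := PySem.Dict.ofList
    [("API", []), ("PAYLOAD", []), ("COMPONENT", []), ("COMBINED", []),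
     ("PATTERN", []), ("TEMPLATE", [])]
  -- for flag, cat in _FLAG_TABLE: if flag in seen: result[cat].append(flag)
  let result : PySem.Dict String (List String) :=
    pvFlagTable.foldl
      (fun d p => if seen.contains p.1 then d.modify p.2 [] (fun v => v ++ [p.1]) else d)
      result0
  -- return result
  result.items

-- ===== PRECONDITION & SPEC =====
def Spec_summarise_flags (flags : List String) (out : List (String × List String)) : Prop := out = summarise_flags_alt flags
instance (flags : List String) (out : List (String × List String)) : Decidable (Spec_summarise_flags flags out) := by unfold Spec_summarise_flags; infer_instance

-- ===== CLAIM (what is proved, stated in full; the proofs are below) =====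
def Claim_equal_summarise_flags : Prop := ∀ (flags : List String), Dom_summarise_flags flags → Spec_summarise_flags flags (summarise_flags flags)

-- ===== LEMMAS AND PROOFS =====

-- Updating a set with elements it already contains leaves it unchanged.
theorem pv_update_eq_self (s : PySem.Set String) (l : List String)
    (h : ∀ x ∈ l, x ∈ s) : PySem.Set.update s l = s := by
  induction l generalizing s with
  | nil => rfl
  | cons x xs ih =>
    have hx : PySem.Set.add s x = s := PySem.Set.add_of_mem (h x (by simp))
    show PySem.Set.update (PySem.Set.add s x) xs = s
    rw [hx]
    exact ih s (fun y hy => h y (by simp [hy]))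

-- One category bucket: sorting the input-set elements that lie in a category set
-- equals filtering that category's pre-sorted flag list by the input set.
theorem pv_bucket (D s cl : List String) (hD : D.Nodup) (hp : s.Perm cl)
    (hcl : cl.Pairwise (· < ·)) :
    PySem.List.sorted (D.filter (fun f => s.contains f)) (fun x => x) false
      = cl.filter (fun f => D.contains f) := by
  apply PySem.List.sorted_eq_of_perm_of_pairwise_lt
  · apply (List.perm_ext_iff_of_nodup ((hcl.imp ne_of_lt).filter _) (hD.filter _)).mpr
    intro a
    simp only [List.mem_filter, List.contains_iff_mem, hp.mem_iff]
    exact ⟨fun ⟨h1, h2⟩ => ⟨h2, h1⟩, fun ⟨h1, h2⟩ => ⟨h2, h1⟩⟩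
  · exact hcl.filter _

-- The dispatch loop equals the same modify loop over the swapped pairs.
theorem pv_foldl_swap (l : List (String × String)) (d : PySem.Dict String (List String)) :
    l.foldl (fun d p => d.modify p.2 [] (fun v => v ++ [p.1])) d
      = (l.map Prod.swap).foldl (fun d q => d.modify q.1 [] (fun v => v ++ [q.2])) d := by
  induction l generalizing d with
  | nil => rfl
  | cons x xs ih => simp [ih]

-- One category of the final equation: B's bucket (the filtered-table pairs whose
-- category is c, projected to flags) is A's sorted intersection for that category.
theorem pv_cat (D s cl : List String) (hD : D.Nodup) (hp : s.Perm cl)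
    (hcl : cl.Pairwise (· < ·)) (c : String)
    (hlit : pvFlagTable.filter (fun p => p.2 == c) = cl.map (fun f => (f, c))) :
    PySem.List.sorted (PySem.Set.inter D s) (fun x => x) false
      = (((pvFlagTable.filter (fun p => D.contains p.1)).map Prod.swap).filter
          (fun p => p.1 == c)).map (fun p => p.2) := by
  have h1 : PySem.Set.inter D s = D.filter (fun f => s.contains f) := rfl
  rw [h1, pv_bucket D s cl hD hp hcl]
  rw [List.filter_map, List.map_map]
  have h2 : ((fun p : String × String => p.1 == c) ∘ Prod.swap) = fun p => p.2 == c := rfl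
  have h3 : ((fun p : String × String => p.2) ∘ Prod.swap) = fun p => p.1 := rfl
  rw [h2, h3, List.filter_filter]
  have h4 : pvFlagTable.filter (fun a => (a.2 == c) && D.contains a.1)
      = (pvFlagTable.filter (fun p => p.2 == c)).filter (fun p => D.contains p.1) := by
    rw [List.filter_filter]
    exact List.filter_congr (fun p _ => Bool.and_comm _ _)
  rw [h4, hlit, List.filter_map, List.map_map]
  simp [Function.comp_def]

-- ===== VERDICT (by name: the statement is the Claim_ definition above) =====
theorem summarise_flags_spec : Claim_equal_summarise_flags := by
  intro flags _
  show summarise_flags flags = summarise_flags_alt flags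
  unfold summarise_flags summarise_flags_alt
  simp only []
  set D : PySem.Set String := PySem.Set.ofList flags with hDdef
  have hD : D.Nodup := PySem.Set.nodup_ofList flags
  rw [PySem.List.foldl_if_eq_foldl_filter]
  set tbl := pvFlagTable.filter (fun p => D.contains p.1) with htbl
  rw [pv_foldl_swap]
  set R := (tbl.map Prod.swap).foldl
      (fun d q => d.modify q.1 [] (fun v => v ++ [q.2]))
      (PySem.Dict.ofList [("API", []), ("PAYLOAD", []), ("COMPONENT", []), ("COMBINED", []),
        ("PATTERN", []), ("TEMPLATE", [])]) with hR
  have hkeys : R.keys = ["API", "PAYLOAD", "COMPONENT", "COMBINED", "PATTERN", "TEMPLATE"] := by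
    rw [hR, PySem.Dict.keys_foldl_modify_key (tbl.map Prod.swap) (fun q => q.1) ([] : List String)
      (fun _ q => (fun v => v ++ [q.2])) _]
    rw [pv_update_eq_self]
    · rfl
    · intro x hx
      simp only [List.map_map, List.mem_map] at hx
      obtain ⟨p, hp, rfl⟩ := hx
      have hpt : p ∈ pvFlagTable := List.mem_of_mem_filter (htbl ▸ hp)
      have : ∀ q ∈ pvFlagTable, (Prod.swap q).1 ∈ (["API", "PAYLOAD", "COMPONENT",
          "COMBINED", "PATTERN", "TEMPLATE"] : List String) := by decide
      exact this p hpt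
  have hitems : R.items = R.keys.map (fun k => (k, R.getD k [])) :=
    PySem.Dict.items_eq_map_keys R (by rw [hkeys]; decide) []
  rw [hitems, hkeys]
  have hbucket : ∀ c : String, c ∈ (["API", "PAYLOAD", "COMPONENT", "COMBINED", "PATTERN",
      "TEMPLATE"] : List String) →
      R.getD c [] = ((tbl.map Prod.swap).filter (fun p => p.1 == c)).map (fun p => p.2) := by
    intro c hcmem
    rw [hR, PySem.Dict.getD_foldl_modify_append]
    have hbase : (PySem.Dict.ofList [("API", ([] : List String)), ("PAYLOAD", []),
        ("COMPONENT", []), ("COMBINED", []), ("PATTERN", []), ("TEMPLATE", [])]).getD c []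
        = [] := by fin_cases hcmem <;> decide
    rw [hbase, List.nil_append]
  have hA : pvCategoryMapA.items =
      [ ("API",       PySem.Set.ofList ["HIGH_API_USAGE", "VERY_HIGH_API_USAGE",
                        "EXCESSIVE_API_USAGE", "HEAVY_MOUNTED_API"]),
        ("PAYLOAD",   PySem.Set.ofList ["COMPLEX_PAYLOAD", "VERY_COMPLEX_PAYLOAD",
                        "DEEP_NESTED_PAYLOAD", "LARGE_PAYLOAD"]),
        ("COMPONENT", PySem.Set.ofList ["LARGE_COMPONENT", "MANY_METHODS", "MANY_COMPUTED",
                        "MANY_WATCHERS", "TOO_MANY_PROPS"]),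
        ("COMBINED",  PySem.Set.ofList ["HIGH_RISK_COMPONENT", "CRITICAL_COMPONENT",
                        "HEAVY_COMPONENT", "MONOLITH_COMPONENT", "COMPLEX_HEAVY_COMPONENT",
                        "ARCHITECTURE_CONCERN"]),
        ("PATTERN",   PySem.Set.ofList ["API_IN_LOOP", "API_CHAINING", "DEPENDENT_API_CALLS",
                        "DUPLICATE_API_CALLS"]),
        ("TEMPLATE",  PySem.Set.ofList ["COMPLEX_TEMPLATE", "DEEP_NESTED_TEMPLATE",
                        "MANY_CHILDREN"]) ] := by decide
  rw [hA]
  rw [List.map_cons, List.map_cons, List.map_cons, List.map_cons, List.map_cons, List.map_cons,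
     List.map_nil, List.map_cons, List.map_cons, List.map_cons, List.map_cons, List.map_cons,
     List.map_cons, List.map_nil]
  refine congrArg₂ _ ?_ (congrArg₂ _ ?_ (congrArg₂ _ ?_ (congrArg₂ _ ?_ (congrArg₂ _ ?_ (congrArg₂ _ ?_ rfl)))))
  · refine congrArg _ ?_
    dsimp only
    rw [hbucket _ (by decide), htbl]
    exact pv_cat D _ ["EXCESSIVE_API_USAGE", "HEAVY_MOUNTED_API", "HIGH_API_USAGE", "VERY_HIGH_API_USAGE"] hD (by decide) (by simp [String.lt_iff_toList_lt]; decide) _ (by decide)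
  · refine congrArg _ ?_
    dsimp only
    rw [hbucket _ (by decide), htbl]
    exact pv_cat D _ ["COMPLEX_PAYLOAD", "DEEP_NESTED_PAYLOAD", "LARGE_PAYLOAD", "VERY_COMPLEX_PAYLOAD"] hD (by decide) (by simp [String.lt_iff_toList_lt]; decide) _ (by decide)
  · refine congrArg _ ?_
    dsimp only
    rw [hbucket _ (by decide), htbl]
    exact pv_cat D _ ["LARGE_COMPONENT", "MANY_COMPUTED", "MANY_METHODS", "MANY_WATCHERS", "TOO_MANY_PROPS"] hD (by decide) (by simp [String.lt_iff_toList_lt]; decide) _ (by decide)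
  · refine congrArg _ ?_
    dsimp only
    rw [hbucket _ (by decide), htbl]
    exact pv_cat D _ ["ARCHITECTURE_CONCERN", "COMPLEX_HEAVY_COMPONENT", "CRITICAL_COMPONENT", "HEAVY_COMPONENT", "HIGH_RISK_COMPONENT", "MONOLITH_COMPONENT"] hD (by decide) (by simp [String.lt_iff_toList_lt]; decide) _ (by decide)
  · refine congrArg _ ?_
    dsimp only
    rw [hbucket _ (by decide), htbl]
    exact pv_cat D _ ["API_CHAINING", "API_IN_LOOP", "DEPENDENT_API_CALLS", "DUPLICATE_API_CALLS"] hD (by decide) (by simp [String.lt_iff_toList_lt]; decide) _ (by decide)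
  · refine congrArg _ ?_
    dsimp only
    rw [hbucket _ (by decide), htbl]
    exact pv_cat D _ ["COMPLEX_TEMPLATE", "DEEP_NESTED_TEMPLATE", "MANY_CHILDREN"] hD (by decide) (by simp [String.lt_iff_toList_lt]; decide) _ (by decide)
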